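-- pv_equiv track=rewrite | github.com/MrBlacDr/Maze | src/ML/q_solve.py | get_best_next_state
-- ===== SOURCE A (Python) =====
-- def get_best_next_state(line: list) -> int:
--     """
--     Получить следующее состояние с наибольшей наградой.
--
--     :param line: строка возможных переходов
--     :return индекс лучшего состояния
--     """
--     max_val = -1
--     max_ind = -1
--     for i, val in enumerate(line):
--         if val > max_val and val >= 0:
--             max_val = val
--             max_ind = i
--     return max_ind
-- ===== SOURCE B (Python) =====
-- def get_best_next_state(line: list) -> int:
--     """Two-pass: find the best nonnegative reward value, then locate its first occurrence."""
--     m = max((v for v in line if v >= 0), default=None)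
--     if m is None:
--         return -1
--     return line.index(m)
-- ===== Notes on version B (the rewrite author's own statement) =====
-- stated objective: alternative
-- what changed: Replaced the fused single-loop argmax (tracking max_val/max_ind with a strict-> update) by a two-pass max-then-locate decomposition: first compute the maximum nonnegative value with max(..., default=None), then find its first index with list.index.
import Mathlib
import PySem

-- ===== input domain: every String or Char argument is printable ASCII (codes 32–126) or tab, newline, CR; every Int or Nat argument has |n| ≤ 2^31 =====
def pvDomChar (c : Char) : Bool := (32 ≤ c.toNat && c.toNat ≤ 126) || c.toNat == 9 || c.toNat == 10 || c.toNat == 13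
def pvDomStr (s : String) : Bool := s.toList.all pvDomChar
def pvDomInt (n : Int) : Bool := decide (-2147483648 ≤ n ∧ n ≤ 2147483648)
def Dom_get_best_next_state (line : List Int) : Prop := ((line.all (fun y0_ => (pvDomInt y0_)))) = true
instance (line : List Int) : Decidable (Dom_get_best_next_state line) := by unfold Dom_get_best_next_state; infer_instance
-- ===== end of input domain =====

-- B replaces A's fused argmax loop by a two-pass max-then-locate decomposition (objective: alternative).

-- ===== PORT A =====
-- for i, val in enumerate(line): if val > max_val and val >= 0: max_val, max_ind = val, i
def get_best_next_state (line : List Int) : Int :=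
  let st := (PySem.List.enumerate line 0).foldl
    (fun (st : Int × Int) (p : Int × Int) =>
      if st.1 < p.2 ∧ 0 ≤ p.2 then (p.2, p.1) else st) (-1, -1)
  st.2

-- ===== PORT B =====
-- m = max((v for v in line if v >= 0), default=None); None → -1; else line.index(m)
def get_best_next_state_alt (line : List Int) : Int :=
  match PySem.List.max? (line.filter (fun v => decide (0 ≤ v))) (fun v => v) with
  | none => -1
  | some m =>
    match PySem.List.index? line m with
    | some i => (i : Int)   -- list.index(m); m is drawn from line, so it is always found
    | none => -1

-- ===== PRECONDITION & SPEC =====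
def Spec_get_best_next_state (line : List Int) (out : Int) : Prop := out = get_best_next_state_alt line
instance (line : List Int) (out : Int) : Decidable (Spec_get_best_next_state line out) := by unfold Spec_get_best_next_state; infer_instance

-- ===== CLAIM (what is proved, stated in full; the proofs are below) =====
def Claim_equal_get_best_next_state : Prop := ∀ (line : List Int), Dom_get_best_next_state line → Spec_get_best_next_state line (get_best_next_state line)

-- ===== LEMMAS AND PROOFS =====

-- A's loop body.
def pvStep (st : Int × Int) (p : Int × Int) : Int × Int :=
  if st.1 < p.2 ∧ 0 ≤ p.2 then (p.2, p.1) else st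

-- Invariant of A's loop: starting from state (mv, mi) at position k, the loop returns (mv, mi)
-- if no later nonnegative value beats mv, and otherwise the best such value with the index of
-- its first occurrence.
theorem pvLoop_spec (line : List Int) : ∀ (k mv mi : Int),
    ((PySem.List.enumerate line k).foldl pvStep (mv, mi)) =
      match PySem.List.max? (line.filter (fun v => decide (mv < v) && decide (0 ≤ v))) (fun v => v) with
      | none => (mv, mi)
      | some M => (M, k + (((PySem.List.index? line M).map (Int.ofNat)).getD 0)) := by
  induction line with
  | nil =>
    intro k mv mi
    rw [PySem.List.enumerate_nil, List.foldl_nil, List.filter_nil,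
      (PySem.List.max?_eq_none_iff ([] : List Int) (fun v => v)).mpr rfl]
  | cons v t ih =>
    intro k mv mi
    rw [PySem.List.enumerate_cons, List.foldl_cons]
    by_cases hc : mv < v ∧ 0 ≤ v
    · have hstep : pvStep (mv, mi) (k, v) = (v, k) := by simp [pvStep, hc]
      rw [hstep, ih (k + 1) v k]
      have hfc : (v :: t).filter (fun x => decide (mv < x) && decide (0 ≤ x))
          = v :: t.filter (fun x => decide (mv < x) && decide (0 ≤ x)) := by
        simp [hc.1, hc.2]
      rw [hfc]
      cases h2 : PySem.List.max? (v :: t.filter (fun x => decide (mv < x) && decide (0 ≤ x))) (fun v => v) with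
      | none => exact absurd ((PySem.List.max?_eq_none_iff _ _).mp h2) (by simp)
      | some M0 =>
        have hM0mem := PySem.List.max?_mem h2
        have hM0max := PySem.List.max?_isMax h2
        have hvle : v ≤ M0 := hM0max v (by simp)
        cases h1 : PySem.List.max? (t.filter (fun x => decide (v < x) && decide (0 ≤ x))) (fun v => v) with
        | none =>
          -- no later value beats v: M0 = v
          have hempty := (PySem.List.max?_eq_none_iff _ _).mp h1
          have hM0v : M0 = v := by
            rcases List.mem_cons.mp hM0mem with h | h
            · exact h
            · by_contra hne
              have hvlt : v < M0 := lt_of_le_of_ne hvle (fun e => hne e.symm)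
              have : M0 ∈ t.filter (fun x => decide (v < x) && decide (0 ≤ x)) := by
                rcases List.mem_filter.mp h with ⟨hmt, hp⟩
                refine List.mem_filter.mpr ⟨hmt, ?_⟩
                simp at hp ⊢
                exact ⟨hvlt, hp.2⟩
              rw [hempty] at this; exact absurd this (List.not_mem_nil)
          subst hM0v
          dsimp only
          rw [PySem.List.index?_cons_self]
          simp
        | some M' =>
          have hM'mem := PySem.List.max?_mem h1
          have hM'max := PySem.List.max?_isMax h1
          rcases List.mem_filter.mp hM'mem with ⟨hM't, hpM'⟩
          simp at hpM'
          have hvM' : v < M' := hpM'.1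
          -- M0 = M'
          have hM0M' : M0 = M' := by
            have h1le : M' ≤ M0 := by
              refine hM0max M' (List.mem_cons.mpr (Or.inr ?_))
              refine List.mem_filter.mpr ⟨hM't, ?_⟩
              simp
              exact ⟨lt_trans hc.1 hvM', hpM'.2⟩
            have h2le : M0 ≤ M' := by
              rcases List.mem_cons.mp hM0mem with h | h
              · exact h ▸ le_of_lt hvM'
              · rcases List.mem_filter.mp h with ⟨hmt, hp⟩
                simp at hp
                by_cases hvM0 : v < M0
                · exact hM'max M0 (List.mem_filter.mpr ⟨hmt, by simp; exact ⟨hvM0, hp.2⟩⟩)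
                · exact le_trans (le_of_not_gt hvM0) (le_of_lt hvM')
            exact le_antisymm h2le h1le
          subst hM0M'
          have hne : v ≠ M0 := ne_of_lt hvM'
          have hsome : (PySem.List.index? t M0).isSome :=
            (PySem.List.index?_isSome_iff t M0).mpr hM't
          rcases Option.isSome_iff_exists.mp hsome with ⟨j, hj⟩
          dsimp only
          rw [PySem.List.index?_cons_of_ne t hne, hj]
          simp
          omega
    · have hstep : pvStep (mv, mi) (k, v) = (mv, mi) := by simp [pvStep, hc]
      rw [hstep, ih (k + 1) mv mi]
      have hfc : (v :: t).filter (fun x => decide (mv < x) && decide (0 ≤ x))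
          = t.filter (fun x => decide (mv < x) && decide (0 ≤ x)) := by
        have : (decide (mv < v) && decide (0 ≤ v)) = false := by
          rcases not_and_or.mp hc with h | h <;> simp [h]
        simp [this]
      rw [hfc]
      cases h1 : PySem.List.max? (t.filter (fun x => decide (mv < x) && decide (0 ≤ x))) (fun v => v) with
      | none => rfl
      | some M =>
        have hMmem := PySem.List.max?_mem h1
        rcases List.mem_filter.mp hMmem with ⟨hMt, hpM⟩
        simp at hpM
        have hne : v ≠ M := by
          rintro rfl
          exact hc ⟨hpM.1, hpM.2⟩
        have hsome : (PySem.List.index? t M).isSome :=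
          (PySem.List.index?_isSome_iff t M).mpr hMt
        rcases Option.isSome_iff_exists.mp hsome with ⟨j, hj⟩
        dsimp only
        rw [PySem.List.index?_cons_of_ne t hne, hj]
        simp
        omega

theorem get_best_next_state_spec : Claim_equal_get_best_next_state := by
  intro line _
  unfold Spec_get_best_next_state get_best_next_state get_best_next_state_alt
  have hfilter : line.filter (fun v => decide ((-1 : Int) < v) && decide (0 ≤ v))
      = line.filter (fun v => decide (0 ≤ v)) := by
    apply List.filter_congr
    intro x _
    by_cases hx : (0 : Int) ≤ x
    · simp [hx]; omega
    · simp [hx]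
  have hmain := pvLoop_spec line 0 (-1) (-1)
  rw [hfilter] at hmain
  show ((PySem.List.enumerate line 0).foldl pvStep (-1, -1)).2 = _
  rw [hmain]
  cases h : PySem.List.max? (line.filter (fun v => decide (0 ≤ v))) (fun v => v) with
  | none => rfl
  | some m =>
    have hmem := PySem.List.max?_mem h
    have hmt : m ∈ line := (List.mem_filter.mp hmem).1
    have hsome : (PySem.List.index? line m).isSome :=
      (PySem.List.index?_isSome_iff line m).mpr hmt
    rcases Option.isSome_iff_exists.mp hsome with ⟨j, hj⟩
    dsimp only
    rw [hj]
    simp
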